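-- pv_equiv track=rewrite | github.com/phrankie81/AdventofCode_2021 | Day_11/part2.py | find_tens
-- ===== SOURCE A (Python) =====
-- def find_tens(board, flashes):
--     if any(10 in x for x in board[1:-1]):
--         for r in range(1, len(board) - 1):
--             for c in range(1, len(board[r]) - 1):
--                 if board[r][c] == 10:
--                     board[r][c] = 0
--                     flashes += 1
--                     for dr, dc in [(1, 0), (-1, 0), (0, 1), (0, -1), (1, -1), (1, 1), (-1, 1), (-1, -1)]:
--                         if board[r + dr][c + dc] != 10 and board[r + dr][c + dc] != 0:
--                             board[r + dr][c + dc] += 1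
--         return find_tens(board, flashes)
--
--     else:
--         return board, flashes
-- ===== SOURCE B (Python) =====
-- # Stack-based flood fill: each flashing cell is processed exactly once, instead of
-- # re-scanning the whole board pass after pass until it stabilises.
-- # Like A, mutates `board` in place and returns (board, flashes).
-- def find_tens(board, flashes):
--     n = len(board)
--     stack = [(r, c) for r in range(1, n - 1)
--              for c in range(1, len(board[r]) - 1)
--              if board[r][c] == 10]
--     while stack:
--         r, c = stack.pop()
--         board[r][c] = 0
--         flashes += 1
--         for dr, dc in [(1, 0), (-1, 0), (0, 1), (0, -1), (1, -1), (1, 1), (-1, 1), (-1, -1)]: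
--             v = board[r + dr][c + dc]
--             if v != 10 and v != 0:
--                 board[r + dr][c + dc] = v + 1
--                 if v + 1 == 10 and 1 <= r + dr < n - 1 and 1 <= c + dc < len(board[r + dr]) - 1:
--                     stack.append((r + dr, c + dc))
--     return board, flashes
-- ===== Notes on version B (the rewrite author's own statement) =====
-- stated objective: alternative
-- what changed: A rescans the whole board recursively, pass after pass, until no 10 remains; B collects the initial 10-cells once and runs a stack-based flood fill that processes each flashing cell exactly once, pushing a neighbour only at the moment it reaches 10.
import Mathlib
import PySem

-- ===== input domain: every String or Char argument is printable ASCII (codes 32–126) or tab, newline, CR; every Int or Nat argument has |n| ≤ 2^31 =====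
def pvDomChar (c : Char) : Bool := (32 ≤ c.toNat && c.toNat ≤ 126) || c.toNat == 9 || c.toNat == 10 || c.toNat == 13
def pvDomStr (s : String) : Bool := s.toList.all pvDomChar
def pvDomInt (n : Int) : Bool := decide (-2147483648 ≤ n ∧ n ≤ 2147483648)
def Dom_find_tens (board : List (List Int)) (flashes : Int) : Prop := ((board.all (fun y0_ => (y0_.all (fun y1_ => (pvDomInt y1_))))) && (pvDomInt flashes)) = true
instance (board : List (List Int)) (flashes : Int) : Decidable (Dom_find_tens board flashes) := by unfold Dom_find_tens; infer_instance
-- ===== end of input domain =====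

-- B replaces A's repeated full-board rescans by a stack-based flood fill that processes each
-- flashing cell once.  Both Pythons mutate `board` in place; the equivalence proved here is
-- about the RETURN value only.

-- board[r][c] as Python reads it (indices here are always ≥ 0; out-of-range reads only
-- happen outside Pre_, where nothing is claimed)
def pvBget (b : List (List Int)) (r c : Nat) : Int := (b.getD r []).getD c 0
-- board[r][c] = v (in-place update of one cell)
def pvBset (b : List (List Int)) (r c : Nat) (v : Int) : List (List Int) :=
  b.set r ((b.getD r []).set c v)
-- the 8 (dr, dc) offsets, in A's and B's shared order
def pvDirs : List (Int × Int) := [(1, 0), (-1, 0), (0, 1), (0, -1), (1, -1), (1, 1), (-1, 1), (-1, -1)]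
-- (r + dr, c + dc); r, c ≥ 1 whenever used, so Int.toNat is exact (no Python wraparound occurs)
def pvNbr (x : Nat × Nat) (d : Int × Int) : Nat × Nat :=
  (((x.1 : Int) + d.1).toNat, ((x.2 : Int) + d.2).toNat)
-- `if board[nr][nc] != 10 and board[nr][nc] != 0: board[nr][nc] += 1`
def pvIncAt (b : List (List Int)) (y : Nat × Nat) : List (List Int) :=
  if pvBget b y.1 y.2 ≠ 10 ∧ pvBget b y.1 y.2 ≠ 0 then pvBset b y.1 y.2 (pvBget b y.1 y.2 + 1) else b

-- ===== PORT A =====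
-- A's flash body: `board[r][c] = 0` followed by the `for dr, dc in [...]` neighbour loop
def pvFlash (b : List (List Int)) (x : Nat × Nat) : List (List Int) :=
  pvDirs.foldl (fun bb d => pvIncAt bb (pvNbr x d)) (pvBset b x.1 x.2 0)

-- body of A's inner loop: `if board[r][c] == 10: … flashes += 1 …`
def pvPassCell (st : List (List Int) × Int) (r c : Nat) : List (List Int) × Int :=
  if pvBget st.1 r c = 10 then (pvFlash st.1 (r, c), st.2 + 1) else st

-- A's two nested `for` loops (one full scan of the board)
def pvPass (st : List (List Int) × Int) : List (List Int) × Int :=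
  (List.range' 1 (st.1.length - 2)).foldl
    (fun st1 r =>
      (List.range' 1 ((st1.1.getD r []).length - 2)).foldl (fun st2 c => pvPassCell st2 r c) st1)
    st

-- `any(10 in x for x in board[1:-1])`
def pvHasTen (b : List (List Int)) : Bool :=
  (PySem.List.slice b (some 1) (some (-1))).any (fun row => row.any (fun v => v == 10))

-- A's recursion; the fuel only makes the recursion structural — on every input admitted by
-- Pre_find_tens the else-branch is reached before the fuel runs out (proved below)
def find_tens_go : Nat → List (List Int) → Int → List (List Int) × Int
  | 0, b, f => (b, f)
  | fuel + 1, b, f =>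
    if pvHasTen b then
      let st := pvPass (b, f)
      find_tens_go fuel st.1 st.2
    else (b, f)

def find_tens (board : List (List Int)) (flashes : Int) : List (List Int) × Int :=
  find_tens_go ((board.map List.length).sum + 1) board flashes

-- ===== PORT B =====
-- B's while-loop.  The Python stack's top is its last element; here the top is the head,
-- so `append` is cons and `pop` takes the head — the same LIFO discipline.
def find_tens_alt_go (n : Nat) : Nat → List (List Int) → Int → List (Nat × Nat) → List (List Int) × Int
  | 0, b, f, _ => (b, f)
  | _fuel + 1, b, f, [] => (b, f)
  | fuel + 1, b, f, (r, c) :: rest =>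
    let p :=
      pvDirs.foldl
        (fun (acc : List (List Int) × List (Nat × Nat)) d =>
          let nr := ((r : Int) + d.1).toNat
          let nc := ((c : Int) + d.2).toNat
          let v := pvBget acc.1 nr nc
          if v ≠ 10 ∧ v ≠ 0 then
            (pvBset acc.1 nr nc (v + 1),
             if v + 1 = 10 ∧ 1 ≤ nr ∧ nr + 1 < n ∧ 1 ≤ nc ∧ nc + 1 < (acc.1.getD nr []).length
             then (nr, nc) :: acc.2 else acc.2)
          else acc)
        (pvBset b r c 0, rest)
    find_tens_alt_go n fuel p.1 (f + 1) p.2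

def find_tens_alt (board : List (List Int)) (flashes : Int) : List (List Int) × Int :=
  let n := board.length
  -- the initial comprehension; `.reverse` because Python pops from the END of that list
  let stack0 :=
    ((List.range' 1 (n - 2)).flatMap (fun r =>
      (List.range' 1 ((board.getD r []).length - 2)).filterMap (fun c =>
        if pvBget board r c = 10 then some (r, c) else none))).reverse
  find_tens_alt_go n ((board.map List.length).sum + 1) board flashes stack0

-- ===== PRECONDITION & SPEC =====
def pvSent (v : Int) : Prop := v = 0 ∨ 10 < v

-- Pre_ admits A's two benign shapes: either no 10 occurs in the middle rows (A returns at
-- once), or the board is rectangular with every middle row starting and ending in a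
-- sentinel value (0 or > 10), the padding the puzzle uses.  A non-rectangular board with a
-- 10 in a middle row can raise IndexError, and a non-sentinel edge value can let the
-- cascade put a 10 on the border, where A recurses forever; Pre_ conservatively excludes
-- all non-sentinel-edge boards, including some on which A happens to return (see cites).
def Pre_find_tens (board : List (List Int)) (flashes : Int) : Prop :=
  (∀ row ∈ PySem.List.slice board (some 1) (some (-1)), (10 : Int) ∉ row) ∨
  ((∀ row ∈ board, row.length = (board.headD []).length) ∧
   ∀ row ∈ PySem.List.slice board (some 1) (some (-1)),
     (∀ v ∈ row.head?, pvSent v) ∧ (∀ v ∈ row.getLast?, pvSent v))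

instance (board : List (List Int)) (flashes : Int) : Decidable (Pre_find_tens board flashes) := by
  unfold Pre_find_tens pvSent; infer_instance

def pvWitness_find_tens : List (List Int) × Int := ([[0, 0, 0], [0, 10, 0], [0, 0, 0]], 0)

def Spec_find_tens (board : List (List Int)) (flashes : Int) (out : List (List Int) × Int) : Prop := out = find_tens_alt board flashes
instance (board : List (List Int)) (flashes : Int) (out : List (List Int) × Int) : Decidable (Spec_find_tens board flashes out) := by unfold Spec_find_tens; infer_instance

-- ===== CLAIM (what is proved, stated in full; the proofs are below) =====
def Claim_equal_find_tens : Prop := ∀ (board : List (List Int)) (flashes : Int), Dom_find_tens board flashes → Pre_find_tens board flashes → Spec_find_tens board flashes (find_tens board flashes)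

-- ===== LEMMAS AND PROOFS =====

-- ---- basic board lemmas ----

theorem pv_getD_eq {α : Type} (l : List α) (d : α) (i : Nat) (h : i < l.length) :
    l.getD i d = l[i] := by
  simp [List.getD_eq_getElem?_getD, List.getElem?_eq_getElem h]

theorem pv_bget_oob (b : List (List Int)) (r c : Nat)
    (h : ¬(r < b.length ∧ c < (b.getD r []).length)) : pvBget b r c = 0 := by
  unfold pvBget
  by_cases hr : r < b.length
  · exact List.getD_eq_default _ _ (by omega)
  · rw [List.getD_eq_default _ _ (by omega : b.length ≤ r)]
    simp

theorem pv_rowget_set (l : List Int) (x c : Nat) (v : Int) :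
    (l.set x v).getD c 0 = if x = c ∧ c < l.length then v else l.getD c 0 := by
  rw [List.getD_eq_getElem?_getD, List.getD_eq_getElem?_getD, List.getElem?_set]
  by_cases h : x = c
  · subst h
    by_cases hl : x < l.length
    · simp [hl]
    · simp [hl]
  · simp [h]

theorem pv_boardrow_set (b : List (List Int)) (x1 : Nat) (row : List Int) (r : Nat) :
    (b.set x1 row).getD r [] = if x1 = r ∧ r < b.length then row else b.getD r [] := by
  rw [List.getD_eq_getElem?_getD, List.getD_eq_getElem?_getD, List.getElem?_set]
  by_cases h : x1 = r
  · subst h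
    by_cases hl : x1 < b.length
    · simp [hl]
    · simp [hl]
  · simp [h]

theorem pv_bget_bset (b : List (List Int)) (x1 x2 : Nat) (v : Int) (r c : Nat) :
    pvBget (pvBset b x1 x2 v) r c =
      if x1 = r ∧ x2 = c ∧ r < b.length ∧ c < (b.getD r []).length then v
      else pvBget b r c := by
  unfold pvBget pvBset
  rw [pv_boardrow_set]
  by_cases h : x1 = r ∧ r < b.length
  · obtain ⟨h1, h2⟩ := h
    subst h1
    rw [if_pos ⟨rfl, h2⟩, pv_rowget_set]
    split_ifs with ha hb hb <;> first | rfl | (exfalso; tauto)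
  · rw [if_neg h]
    rw [if_neg ?_]
    by_cases hr : r < b.length <;> tauto

theorem pv_bget_bset0 (b : List (List Int)) (x1 x2 r c : Nat) :
    pvBget (pvBset b x1 x2 0) r c = if x1 = r ∧ x2 = c then 0 else pvBget b r c := by
  rw [pv_bget_bset]
  by_cases h2 : x1 = r ∧ x2 = c
  · rw [if_pos h2]
    by_cases h1 : x1 = r ∧ x2 = c ∧ r < b.length ∧ c < (b.getD r []).length
    · rw [if_pos h1]
    · rw [if_neg h1]
      exact pv_bget_oob _ _ _ (by tauto)
  · rw [if_neg h2, if_neg (by tauto)]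

def pvIncIf (v : Int) : Int := if v ≠ 10 ∧ v ≠ 0 then v + 1 else v

theorem pv_bget_incAt (b : List (List Int)) (y : Nat × Nat) (r c : Nat) :
    pvBget (pvIncAt b y) r c =
      if y = (r, c) then pvIncIf (pvBget b r c) else pvBget b r c := by
  unfold pvIncAt pvIncIf
  by_cases hv : pvBget b y.1 y.2 ≠ 10 ∧ pvBget b y.1 y.2 ≠ 0
  · rw [if_pos hv]
    rw [pv_bget_bset]
    by_cases hy : y = (r, c)
    · have h1 : y.1 = r := by rw [hy]
      have h2 : y.2 = c := by rw [hy]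
      have hin : y.1 < b.length ∧ y.2 < (b.getD y.1 []).length := by
        by_contra hn
        exact hv.2 (pv_bget_oob _ _ _ hn)
      rw [if_pos ⟨h1, h2, h1 ▸ hin.1, by rw [← h1, ← h2]; exact hin.2⟩, if_pos hy]
      rw [← h1, ← h2]
      simp [hv]
    · have hne : ¬(y.1 = r ∧ y.2 = c ∧ r < b.length ∧ c < (b.getD r []).length) := by
        rintro ⟨ha, hb, -⟩; exact hy (Prod.ext ha hb)
      rw [if_neg hne, if_neg hy]
  · rw [if_neg hv]
    by_cases hy : y = (r, c)
    · have h1 : y.1 = r := by rw [hy]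
      have h2 : y.2 = c := by rw [hy]
      rw [if_pos hy]
      rw [← h1, ← h2]
      rw [if_neg hv]
    · rw [if_neg hy]

-- shape preservation
theorem pv_length_bset (b : List (List Int)) (x1 x2 : Nat) (v : Int) :
    (pvBset b x1 x2 v).length = b.length := by
  simp [pvBset]

theorem pv_rowlen_bset (b : List (List Int)) (x1 x2 : Nat) (v : Int) (r : Nat) :
    ((pvBset b x1 x2 v).getD r []).length = (b.getD r []).length := by
  unfold pvBset
  rw [pv_boardrow_set]
  split_ifs with h
  · obtain ⟨h1, -⟩ := h
    subst h1
    simp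
  · rfl

theorem pv_length_incAt (b : List (List Int)) (y : Nat × Nat) :
    (pvIncAt b y).length = b.length := by
  unfold pvIncAt; split <;> simp [pv_length_bset]

theorem pv_rowlen_incAt (b : List (List Int)) (y : Nat × Nat) (r : Nat) :
    ((pvIncAt b y).getD r []).length = ((b.getD r []).length) := by
  unfold pvIncAt; split
  · exact pv_rowlen_bset _ _ _ _ _
  · rfl


-- ---- pointwise characterisation of a flash ----

theorem pv_incIf_zero : pvIncIf 0 = 0 := by simp [pvIncIf]
theorem pv_incIf_ten : pvIncIf 10 = 10 := by simp [pvIncIf]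
theorem pv_iter_incIf_zero (k : Nat) : pvIncIf^[k] 0 = 0 := Function.iterate_fixed pv_incIf_zero k
theorem pv_iter_incIf_ten (k : Nat) : pvIncIf^[k] 10 = 10 := Function.iterate_fixed pv_incIf_ten k

theorem pv_foldl_incAt_length : ∀ (ys : List (Nat × Nat)) (b : List (List Int)),
    (ys.foldl pvIncAt b).length = b.length
  | [], _ => rfl
  | y :: t, b => by
    rw [List.foldl_cons, pv_foldl_incAt_length t, pv_length_incAt]

theorem pv_foldl_incAt_rowlen : ∀ (ys : List (Nat × Nat)) (b : List (List Int)) (r : Nat),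
    ((ys.foldl pvIncAt b).getD r []).length = (b.getD r []).length
  | [], _, _ => rfl
  | y :: t, b, r => by
    rw [List.foldl_cons, pv_foldl_incAt_rowlen t, pv_rowlen_incAt]

theorem pv_foldl_incAt_bget : ∀ (ys : List (Nat × Nat)) (b : List (List Int)) (r c : Nat),
    pvBget (ys.foldl pvIncAt b) r c = pvIncIf^[ys.count (r, c)] (pvBget b r c)
  | [], _, _, _ => rfl
  | y :: t, b, r, c => by
    rw [List.foldl_cons, pv_foldl_incAt_bget t, pv_bget_incAt, List.count_cons]
    by_cases hy : y = (r, c)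
    · rw [if_pos hy]
      simp [hy, Function.iterate_succ_apply]
    · rw [if_neg hy]
      simp [hy]

def pvNbrs (x : Nat × Nat) : List (Nat × Nat) := pvDirs.map (pvNbr x)

theorem pv_flash_eq (b : List (List Int)) (x : Nat × Nat) :
    pvFlash b x = (pvNbrs x).foldl pvIncAt (pvBset b x.1 x.2 0) := by
  unfold pvFlash pvNbrs
  rw [List.foldl_map]

theorem pv_length_flash (b : List (List Int)) (x : Nat × Nat) :
    (pvFlash b x).length = b.length := by
  rw [pv_flash_eq, pv_foldl_incAt_length, pv_length_bset]

theorem pv_rowlen_flash (b : List (List Int)) (x : Nat × Nat) (r : Nat) :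
    ((pvFlash b x).getD r []).length = (b.getD r []).length := by
  rw [pv_flash_eq, pv_foldl_incAt_rowlen, pv_rowlen_bset]

theorem pv_bget_flash (b : List (List Int)) (x : Nat × Nat) (r c : Nat) :
    pvBget (pvFlash b x) r c =
      pvIncIf^[(pvNbrs x).count (r, c)] (if x = (r, c) then 0 else pvBget b r c) := by
  rw [pv_flash_eq, pv_foldl_incAt_bget, pv_bget_bset0]
  congr 1
  by_cases hx : x = (r, c)
  · rw [if_pos hx, if_pos ⟨by rw [hx], by rw [hx]⟩]
  · rw [if_neg hx, if_neg (by rintro ⟨h1, h2⟩; exact hx (Prod.ext h1 h2))]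

-- board extensionality
theorem pv_bext (b1 b2 : List (List Int)) (h1 : b1.length = b2.length)
    (h2 : ∀ r, (b1.getD r []).length = (b2.getD r []).length)
    (h3 : ∀ r c, pvBget b1 r c = pvBget b2 r c) : b1 = b2 := by
  apply List.ext_getElem h1
  intro r hr1 hr2
  apply List.ext_getElem
  · have := h2 r
    rwa [pv_getD_eq _ _ _ hr1, pv_getD_eq _ _ _ hr2] at this
  · intro c hc1 hc2
    have := h3 r c
    unfold pvBget at this
    rw [pv_getD_eq _ _ _ hr1, pv_getD_eq _ _ _ hr2] at this
    rwa [pv_getD_eq _ _ _ hc1, pv_getD_eq _ _ _ hc2] at this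

theorem pv_flash_comm (b : List (List Int)) (x y : Nat × Nat) :
    pvFlash (pvFlash b x) y = pvFlash (pvFlash b y) x := by
  apply pv_bext
  · rw [pv_length_flash, pv_length_flash, pv_length_flash, pv_length_flash]
  · intro r
    rw [pv_rowlen_flash, pv_rowlen_flash, pv_rowlen_flash, pv_rowlen_flash]
  · intro r c
    rw [pv_bget_flash, pv_bget_flash, pv_bget_flash, pv_bget_flash]
    by_cases hx : x = (r, c) <;> by_cases hy : y = (r, c)
    · simp [hx, hy, pv_iter_incIf_zero]
    · simp [hx, hy, pv_iter_incIf_zero]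
    · simp [hx, hy, pv_iter_incIf_zero]
    · simp only [if_neg hx, if_neg hy]
      rw [← Function.iterate_add_apply, ← Function.iterate_add_apply, Nat.add_comm]

-- ---- the measure ----
def pvP (v : Int) : Bool := decide (1 ≤ v ∧ v ≤ 10)
def pvMu (b : List (List Int)) : Nat := (b.map (fun row => row.countP pvP)).sum

theorem pv_incIf_notP (v : Int) (h : pvP v = false) : pvP (pvIncIf v) = false := by
  simp only [pvP, decide_eq_false_iff_not] at *
  unfold pvIncIf
  split <;> omega

theorem pv_iter_incIf_notP (k : Nat) (v : Int) (h : pvP v = false) :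
    pvP (pvIncIf^[k] v) = false := by
  induction k generalizing v with
  | zero => exact h
  | succ k ih => rw [Function.iterate_succ_apply]; exact ih _ (pv_incIf_notP _ h)

theorem pv_countP_le (l1 l2 : List Int) (hlen : l1.length = l2.length)
    (h : ∀ c, pvP (l1.getD c 0) = true → pvP (l2.getD c 0) = true) :
    l1.countP pvP ≤ l2.countP pvP := by
  induction l1 generalizing l2 with
  | nil =>
    cases l2 with
    | nil => exact le_refl _
    | cons _ _ => simp at hlen
  | cons a t1 ih =>
    cases l2 with
    | nil => simp at hlen
    | cons b t2 =>
      rw [List.countP_cons, List.countP_cons]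
      have hh := h 0
      simp only [List.getD_cons_zero] at hh
      have ht : t1.countP pvP ≤ t2.countP pvP := by
        apply ih
        · simpa using hlen
        · intro c hc
          have := h (c + 1)
          simpa using this hc
      by_cases ha : pvP a = true
      · simp [ha, hh ha]; omega
      · simp only [Bool.not_eq_true] at ha
        simp [ha]
        by_cases hb : pvP b = true <;> simp [hb] <;> omega

theorem pv_countP_lt (l1 l2 : List Int) (hlen : l1.length = l2.length)
    (h : ∀ c, pvP (l1.getD c 0) = true → pvP (l2.getD c 0) = true)
    (hw : ∃ c, c < l2.length ∧ pvP (l2.getD c 0) = true ∧ pvP (l1.getD c 0) = false) :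
    l1.countP pvP < l2.countP pvP := by
  induction l1 generalizing l2 with
  | nil =>
    cases l2 with
    | nil => obtain ⟨c, hc, -⟩ := hw; simp at hc
    | cons _ _ => simp at hlen
  | cons a t1 ih =>
    cases l2 with
    | nil => simp at hlen
    | cons b t2 =>
      rw [List.countP_cons, List.countP_cons]
      have hh := h 0
      simp only [List.getD_cons_zero] at hh
      have htail : ∀ c, pvP (t1.getD c 0) = true → pvP (t2.getD c 0) = true := by
        intro c hc
        have := h (c + 1)
        simpa using this hc
      have hlent : t1.length = t2.length := by simpa using hlen
      obtain ⟨c, hc, hc2, hc1⟩ := hw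
      cases c with
      | zero =>
        simp only [List.getD_cons_zero] at hc2 hc1
        have ht := pv_countP_le t1 t2 hlent htail
        simp [hc1, hc2]
        omega
      | succ c =>
        have ht : t1.countP pvP < t2.countP pvP := by
          apply ih _ hlent htail
          exact ⟨c, by simpa using hc, by simpa using hc2, by simpa using hc1⟩
        by_cases ha : pvP a = true
        · simp [ha, hh ha]; omega
        · simp only [Bool.not_eq_true] at ha
          simp [ha]
          by_cases hb : pvP b = true <;> simp [hb] <;> omega

theorem pv_mu_le (b1 b2 : List (List Int)) (hlen : b1.length = b2.length)
    (hrow : ∀ r, (b1.getD r []).length = (b2.getD r []).length)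
    (h : ∀ r c, pvP (pvBget b1 r c) = true → pvP (pvBget b2 r c) = true) :
    pvMu b1 ≤ pvMu b2 := by
  induction b1 generalizing b2 with
  | nil =>
    cases b2 with
    | nil => exact le_refl _
    | cons _ _ => simp at hlen
  | cons a t1 ih =>
    cases b2 with
    | nil => simp at hlen
    | cons b t2 =>
      simp only [pvMu, List.map_cons, List.sum_cons]
      have h0 : a.countP pvP ≤ b.countP pvP := by
        apply pv_countP_le _ _ (by simpa using hrow 0)
        intro c hc
        simpa using h 0 c (by simpa using hc)
      have ht : pvMu t1 ≤ pvMu t2 :=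
        ih t2 (by simpa using hlen) (fun r => by simpa using hrow (r + 1))
          (fun r c hh => by simpa using h (r + 1) c (by simpa using hh))
      simp only [pvMu] at ht
      omega

theorem pv_mu_lt (b1 b2 : List (List Int)) (hlen : b1.length = b2.length)
    (hrow : ∀ r, (b1.getD r []).length = (b2.getD r []).length)
    (h : ∀ r c, pvP (pvBget b1 r c) = true → pvP (pvBget b2 r c) = true)
    (hw : ∃ r c, r < b2.length ∧ c < (b2.getD r []).length ∧
      pvP (pvBget b2 r c) = true ∧ pvP (pvBget b1 r c) = false) :
    pvMu b1 < pvMu b2 := by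
  induction b1 generalizing b2 with
  | nil =>
    cases b2 with
    | nil => obtain ⟨r, c, hr, -⟩ := hw; simp at hr
    | cons _ _ => simp at hlen
  | cons a t1 ih =>
    cases b2 with
    | nil => simp at hlen
    | cons b t2 =>
      simp only [pvMu, List.map_cons, List.sum_cons]
      obtain ⟨r, c, hr, hc, h2, h1⟩ := hw
      cases r with
      | zero =>
        have h0 : a.countP pvP < b.countP pvP := by
          apply pv_countP_lt _ _ (by simpa using hrow 0)
            (fun c hc => by simpa using h 0 c (by simpa using hc))
          exact ⟨c, by simpa using hc, by simpa using h2, by simpa using h1⟩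
        have ht : pvMu t1 ≤ pvMu t2 :=
          pv_mu_le t1 t2 (by simpa using hlen) (fun r => by simpa using hrow (r + 1))
            (fun r c hh => by simpa using h (r + 1) c (by simpa using hh))
        simp only [pvMu] at ht
        omega
      | succ r =>
        have h0 : a.countP pvP ≤ b.countP pvP := by
          apply pv_countP_le _ _ (by simpa using hrow 0)
          intro c hc
          simpa using h 0 c (by simpa using hc)
        have ht : pvMu t1 < pvMu t2 := by
          apply ih t2 (by simpa using hlen) (fun r => by simpa using hrow (r + 1))
            (fun r c hh => by simpa using h (r + 1) c (by simpa using hh))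
          exact ⟨r, c, by simpa using hr, by simpa using hc, by simpa using h2, by simpa using h1⟩
        simp only [pvMu] at ht
        omega

theorem pv_mu_le_sum (b : List (List Int)) : pvMu b ≤ (b.map List.length).sum := by
  induction b with
  | nil => simp [pvMu]
  | cons a t ih =>
    simp only [pvMu, List.map_cons, List.sum_cons] at *
    have := List.countP_le_length (p := pvP) (l := a)
    omega

-- ---- applicable cells, chains of flashes, determinism ----

def pvInterior (b : List (List Int)) (x : Nat × Nat) : Prop :=
  1 ≤ x.1 ∧ x.1 + 1 < b.length ∧ 1 ≤ x.2 ∧ x.2 + 1 < (b.getD x.1 []).length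

def pvAppl (b : List (List Int)) (x : Nat × Nat) : Prop :=
  pvInterior b x ∧ pvBget b x.1 x.2 = 10

inductive pvChain : List (List Int) → List (Nat × Nat) → List (List Int) → Prop
  | nil (b : List (List Int)) : pvChain b [] b
  | cons {b : List (List Int)} {x : Nat × Nat} {L : List (Nat × Nat)} {b' : List (List Int)} :
      pvAppl b x → pvChain (pvFlash b x) L b' → pvChain b (x :: L) b'

def pvNF (b : List (List Int)) : Prop := ∀ x, ¬ pvAppl b x

theorem pv_interior_shape (b b' : List (List Int)) (x : Nat × Nat)
    (hlen : b'.length = b.length) (hrow : ∀ r, (b'.getD r []).length = (b.getD r []).length) :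
    pvInterior b x → pvInterior b' x := by
  intro ⟨h1, h2, h3, h4⟩
  exact ⟨h1, by omega, h3, by rw [hrow]; omega⟩

theorem pv_appl_flash {b : List (List Int)} {x y : Nat × Nat}
    (h : pvAppl b y) (hne : y ≠ x) : pvAppl (pvFlash b x) y := by
  refine ⟨pv_interior_shape b _ y (pv_length_flash b x) (pv_rowlen_flash b x) h.1, ?_⟩
  rw [pv_bget_flash]
  rw [if_neg (by rintro rfl; exact hne rfl)]
  rw [h.2, pv_iter_incIf_ten]

theorem pv_mu_flash_lt {b : List (List Int)} {x : Nat × Nat} (h : pvAppl b x) :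
    pvMu (pvFlash b x) < pvMu b := by
  apply pv_mu_lt
  · exact pv_length_flash b x
  · exact pv_rowlen_flash b x
  · intro r c hP
    rw [pv_bget_flash] at hP
    by_cases hx : x = (r, c)
    · rw [if_pos hx, pv_iter_incIf_zero] at hP
      simp [pvP] at hP
    · rw [if_neg hx] at hP
      by_contra hnot
      rw [pv_iter_incIf_notP _ _ (by simpa using hnot)] at hP
      exact Bool.false_ne_true hP
  · refine ⟨x.1, x.2, by have := h.1.2.1; omega, by have := h.1.2.2.2; omega, ?_, ?_⟩
    · rw [h.2]; decide
    · rw [pv_bget_flash, if_pos (by rfl), pv_iter_incIf_zero]; decide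

theorem pv_chain_append {b b1 b2 : List (List Int)} {L1 L2 : List (Nat × Nat)}
    (h1 : pvChain b L1 b1) (h2 : pvChain b1 L2 b2) : pvChain b (L1 ++ L2) b2 := by
  induction h1 with
  | nil => exact h2
  | cons ha _ ih => exact .cons ha (ih h2)

theorem pv_chain_shape {b b' : List (List Int)} {L : List (Nat × Nat)} (h : pvChain b L b') :
    b'.length = b.length ∧ ∀ r, (b'.getD r []).length = (b.getD r []).length := by
  induction h with
  | nil => exact ⟨rfl, fun _ => rfl⟩
  | cons _ _ ih =>
    refine ⟨ih.1.trans (pv_length_flash _ _), fun r => (ih.2 r).trans (pv_rowlen_flash _ _ r)⟩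

theorem pv_chain_mu {b b' : List (List Int)} {L : List (Nat × Nat)} (h : pvChain b L b') :
    pvMu b' + L.length ≤ pvMu b := by
  induction h with
  | nil => simp
  | cons ha _ ih =>
    have := pv_mu_flash_lt ha
    simp only [List.length_cons]
    omega

theorem pv_exists_nf (b : List (List Int)) : ∃ L b', pvChain b L b' ∧ pvNF b' := by
  by_cases h : pvNF b
  · exact ⟨[], b, .nil b, h⟩
  · simp only [pvNF, not_forall, not_not] at h
    obtain ⟨x, hx⟩ := h
    have hlt := pv_mu_flash_lt hx
    obtain ⟨L, b', hc, hnf⟩ := pv_exists_nf (pvFlash b x)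
    exact ⟨x :: L, b', .cons hx hc, hnf⟩
termination_by pvMu b

theorem pv_det_aux (k : Nat) :
    ∀ (b : List (List Int)) (L1 : List (Nat × Nat)) (b1 : List (List Int))
      (L2 : List (Nat × Nat)) (b2 : List (List Int)), pvMu b ≤ k →
    pvChain b L1 b1 → pvNF b1 → pvChain b L2 b2 → pvNF b2 → b1 = b2 ∧ L1.length = L2.length := by
  induction k with
  | zero =>
    intro b L1 b1 L2 b2 hk hc1 hnf1 hc2 hnf2
    cases hc1 with
    | nil =>
      cases hc2 with
      | nil => exact ⟨rfl, rfl⟩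
      | cons hy _ => exact absurd hy (hnf1 _)
    | cons hx _ =>
      have := pv_mu_flash_lt hx
      omega
  | succ k ih =>
    intro b L1 b1 L2 b2 hk hc1 hnf1 hc2 hnf2
    cases hc1 with
    | nil =>
      cases hc2 with
      | nil => exact ⟨rfl, rfl⟩
      | cons hy _ => exact absurd hy (hnf1 _)
    | @cons _ x L1' _ hx hc1' =>
      cases hc2 with
      | nil => exact absurd hx (hnf2 _)
      | @cons _ y L2' _ hy hc2' =>
        have hlt1 := pv_mu_flash_lt hx
        by_cases hxy : x = y
        · subst hxy
          have := ih (pvFlash b x) L1' b1 L2' b2 (by omega) hc1' hnf1 hc2' hnf2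
          exact ⟨this.1, by simp [this.2]⟩
        · have hlt2 := pv_mu_flash_lt hy
          have h1 : pvAppl (pvFlash b x) y := pv_appl_flash hy (Ne.symm hxy)
          have h2 : pvAppl (pvFlash b y) x := pv_appl_flash hx hxy
          obtain ⟨u, d, hu, hdnf⟩ := pv_exists_nf (pvFlash (pvFlash b x) y)
          have c1 : pvChain (pvFlash b x) (y :: u) d := .cons h1 hu
          have c2 : pvChain (pvFlash b y) (x :: u) d := by
            refine .cons h2 ?_
            rw [pv_flash_comm b y x]
            exact hu
          have r1 := ih (pvFlash b x) L1' b1 (y :: u) d (by omega) hc1' hnf1 c1 hdnf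
          have r2 := ih (pvFlash b y) L2' b2 (x :: u) d (by omega) hc2' hnf2 c2 hdnf
          refine ⟨r1.1.trans r2.1.symm, ?_⟩
          have e1 := r1.2
          have e2 := r2.2
          simp only [List.length_cons] at *
          omega

theorem pv_det {b b1 b2 : List (List Int)} {L1 L2 : List (Nat × Nat)}
    (hc1 : pvChain b L1 b1) (hnf1 : pvNF b1) (hc2 : pvChain b L2 b2) (hnf2 : pvNF b2) :
    b1 = b2 ∧ L1.length = L2.length :=
  pv_det_aux (pvMu b) b L1 b1 L2 b2 (le_refl _) hc1 hnf1 hc2 hnf2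

-- ---- board[1:-1], the stop condition, and the sentinel invariant ----

theorem pv_slice_mid (b : List (List Int)) :
    PySem.List.slice b (some 1) (some (-1)) = (b.drop 1).take (b.length - 2) := by
  rcases b with _ | ⟨a, t⟩
  · rfl
  · simp only [PySem.List.slice, PySem.List.clampIdx]
    norm_num
    rw [if_neg (by omega : ¬((t.length : Int) < 0))]
    omega

theorem pv_mem_mid (b : List (List Int)) (row : List Int) :
    row ∈ PySem.List.slice b (some 1) (some (-1)) ↔
      ∃ r, 1 ≤ r ∧ r + 1 < b.length ∧ row = b.getD r [] := by
  rw [pv_slice_mid]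
  constructor
  · intro hm
    obtain ⟨i, hi, hrow⟩ := List.getElem_of_mem hm
    have hlt : i < b.length - 2 := by
      have := hi
      simp only [List.length_take, List.length_drop] at this
      omega
    have hib : i + 1 < b.length := by omega
    refine ⟨i + 1, by omega, by omega, ?_⟩
    rw [← hrow]
    rw [List.getElem_take, List.getElem_drop]
    rw [pv_getD_eq _ _ _ (by omega)]
    congr 1
    omega
  · rintro ⟨r, hr1, hr2, rfl⟩
    have hlen : ((b.drop 1).take (b.length - 2)).length = b.length - 2 := by
      simp only [List.length_take, List.length_drop]
      omega
    have hidx : r - 1 < ((b.drop 1).take (b.length - 2)).length := by omega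
    have : ((b.drop 1).take (b.length - 2))[r - 1] = b.getD r [] := by
      rw [List.getElem_take, List.getElem_drop]
      rw [pv_getD_eq _ _ _ (by omega)]
      congr 1
      omega
    rw [← this]
    exact List.getElem_mem hidx

theorem pv_hasTen_iff (b : List (List Int)) :
    pvHasTen b = true ↔ ∃ row ∈ PySem.List.slice b (some 1) (some (-1)), (10 : Int) ∈ row := by
  simp [pvHasTen]

-- the sentinel invariant: middle-row edge cells are 0 or > 10
def pvInv (b : List (List Int)) : Prop :=
  ∀ r, 1 ≤ r → r + 1 < b.length →
    pvSent (pvBget b r 0) ∧ pvSent (pvBget b r ((b.getD r []).length - 1))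

theorem pv_sent_incIf {v : Int} (h : pvSent v) : pvSent (pvIncIf v) := by
  unfold pvIncIf pvSent at *
  split <;> omega

theorem pv_sent_iter {v : Int} (k : Nat) (h : pvSent v) : pvSent (pvIncIf^[k] v) := by
  induction k generalizing v with
  | zero => exact h
  | succ k ih => rw [Function.iterate_succ_apply]; exact ih (pv_sent_incIf h)

theorem pv_inv_flash {b : List (List Int)} {x : Nat × Nat} (hI : pvInv b) (hx : pvAppl b x) :
    pvInv (pvFlash b x) := by
  intro r h1 h2
  rw [pv_length_flash] at h2
  have hrl := pv_rowlen_flash b x r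
  have hget : ∀ c : Nat, ¬ (x = (r, c)) → pvBget (pvFlash b x) r c = pvIncIf^[(pvNbrs x).count (r, c)] (pvBget b r c) := by
    intro c hc
    rw [pv_bget_flash, if_neg hc]
  obtain ⟨⟨hx1, hx2, hx3, hx4⟩, -⟩ := hx
  constructor
  · rw [hget 0 (by rintro hh; rw [hh] at hx3; omega)]
    exact pv_sent_iter _ (hI r h1 h2).1
  · rw [hrl]
    rw [hget ((b.getD r []).length - 1) ?_]
    · exact pv_sent_iter _ (hI r h1 h2).2
    · rintro hh
      have e1 : x.1 = r := by rw [hh]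
      have e2 : x.2 = (b.getD r []).length - 1 := by rw [hh]
      rw [e1] at hx4
      omega

theorem pv_chain_inv {b b' : List (List Int)} {L : List (Nat × Nat)}
    (h : pvChain b L b') (hI : pvInv b) : pvInv b' := by
  induction h with
  | nil => exact hI
  | cons ha _ ih => exact ih (pv_inv_flash hI ha)

theorem pv_getD_mem_row (row : List Int) (c : Nat) (hc : c < row.length) :
    row.getD c 0 ∈ row := by
  rw [pv_getD_eq _ _ _ hc]
  exact List.getElem_mem hc

theorem pv_inv_hasTen {b : List (List Int)} (hI : pvInv b) (h : pvHasTen b = true) :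
    ∃ x, pvAppl b x := by
  rw [pv_hasTen_iff] at h
  obtain ⟨row, hmem, h10⟩ := h
  rw [pv_mem_mid] at hmem
  obtain ⟨r, hr1, hr2, rfl⟩ := hmem
  obtain ⟨c, hc, hval⟩ := List.getElem_of_mem h10
  have hgv : pvBget b r c = 10 := by
    unfold pvBget
    rw [pv_getD_eq _ _ _ hc, hval]
  have hs := hI r hr1 hr2
  have hc0 : c ≠ 0 := by
    rintro rfl
    rcases hs.1 with h' | h' <;> rw [hgv] at h' <;> omega
  have hclast : c + 1 ≠ (b.getD r []).length := by
    intro he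
    have : c = (b.getD r []).length - 1 := by omega
    rcases hs.2 with h' | h' <;> rw [← this, hgv] at h' <;> omega
  refine ⟨(r, c), ⟨⟨?_, ?_, ?_, ?_⟩, hgv⟩⟩
  · exact hr1
  · exact hr2
  · show 1 ≤ c; omega
  · show c + 1 < (b.getD r []).length; omega

theorem pv_nf_of_not_hasTen {b : List (List Int)} (h : pvHasTen b = false) : pvNF b := by
  intro x ⟨⟨h1, h2, h3, h4⟩, hv⟩
  have : pvHasTen b = true := by
    rw [pv_hasTen_iff]
    refine ⟨b.getD x.1 [], ?_, ?_⟩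
    · rw [pv_mem_mid]
      exact ⟨x.1, h1, h2, rfl⟩
    · rw [← hv]
      exact pv_getD_mem_row _ _ (by omega)
  rw [h] at this
  exact Bool.false_ne_true this

-- ---- port A produces a chain to a normal form ----

set_option maxHeartbeats 1000000 in
theorem pv_cols_fold (b0 : List (List Int)) (f0 : Int) (r : Nat)
    (hr1 : 1 ≤ r) (hr2 : r + 1 < b0.length) :
    ∀ (cs : List Nat) (bst : List (List Int)) (fst : Int) (L : List (Nat × Nat)),
    pvChain b0 L bst → fst = f0 + L.length →
    (∀ c ∈ cs, 1 ≤ c ∧ c + 1 < (b0.getD r []).length) →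
    ∃ L', pvChain b0 L' (cs.foldl (fun st2 c => pvPassCell st2 r c) (bst, fst)).1 ∧
      (cs.foldl (fun st2 c => pvPassCell st2 r c) (bst, fst)).2 = f0 + L'.length ∧
      L.length ≤ L'.length ∧
      ((cs.foldl (fun st2 c => pvPassCell st2 r c) (bst, fst)).2 = fst →
        (cs.foldl (fun st2 c => pvPassCell st2 r c) (bst, fst)) = (bst, fst) ∧
        ∀ c ∈ cs, pvBget bst r c ≠ 10) := by
  intro cs
  induction cs with
  | nil =>
    intro bst fst L hch hf _
    exact ⟨L, hch, hf, le_refl _, fun _ => ⟨rfl, by simp⟩⟩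
  | cons c cs' ih =>
    intro bst fst L hch hf hcs
    rw [List.foldl_cons]
    by_cases h10 : pvBget bst r c = 10
    · have hshape := pv_chain_shape hch
      have happl : pvAppl bst (r, c) := by
        refine ⟨⟨?_, ?_, ?_, ?_⟩, h10⟩
        · exact hr1
        · show r + 1 < bst.length; omega
        · show 1 ≤ c; exact (hcs c (by simp)).1
        · show c + 1 < (bst.getD r []).length
          rw [hshape.2 r]
          exact (hcs c (by simp)).2
      have hstep : pvPassCell (bst, fst) r c = (pvFlash bst (r, c), fst + 1) := by
        unfold pvPassCell
        rw [if_pos h10]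
      rw [hstep]
      have hch2 : pvChain b0 (L ++ [(r, c)]) (pvFlash bst (r, c)) :=
        pv_chain_append hch (.cons happl (.nil _))
      have hf2 : fst + 1 = f0 + ((L ++ [(r, c)]) : List (Nat × Nat)).length := by
        simp only [List.length_append, List.length_cons, List.length_nil]
        push_cast
        omega
      have hcs' : ∀ c' ∈ cs', 1 ≤ c' ∧ c' + 1 < (b0.getD r []).length :=
        fun c' hc' => hcs c' (by simp [hc'])
      obtain ⟨L', h1, h2, h3, _⟩ := ih (pvFlash bst (r, c)) (fst + 1) (L ++ [(r, c)]) hch2 hf2 hcs'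
      simp only [List.length_append, List.length_cons, List.length_nil] at h3
      refine ⟨L', h1, h2, by omega, ?_⟩
      intro hcount
      exfalso
      rw [h2, hf] at hcount
      omega
    · have hstep : pvPassCell (bst, fst) r c = (bst, fst) := by
        unfold pvPassCell
        rw [if_neg h10]
      rw [hstep]
      have hcs' : ∀ c' ∈ cs', 1 ≤ c' ∧ c' + 1 < (b0.getD r []).length :=
        fun c' hc' => hcs c' (by simp [hc'])
      obtain ⟨L', h1, h2, h3, h4⟩ := ih bst fst L hch hf hcs'
      refine ⟨L', h1, h2, h3, ?_⟩
      intro hcount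
      obtain ⟨he, hall⟩ := h4 hcount
      refine ⟨he, ?_⟩
      intro c' hc'
      rcases List.mem_cons.mp hc' with rfl | hc'
      · exact h10
      · exact hall c' hc'

set_option maxHeartbeats 1000000 in
theorem pv_rows_fold (b0 : List (List Int)) (f0 : Int) :
    ∀ (rs : List Nat) (bst : List (List Int)) (fst : Int) (L : List (Nat × Nat)),
    pvChain b0 L bst → fst = f0 + L.length →
    (∀ r ∈ rs, 1 ≤ r ∧ r + 1 < b0.length) →
    ∃ L', pvChain b0 L'
        (rs.foldl (fun st1 r =>
          (List.range' 1 ((st1.1.getD r []).length - 2)).foldl (fun st2 c => pvPassCell st2 r c) st1) (bst, fst)).1 ∧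
      (rs.foldl (fun st1 r =>
          (List.range' 1 ((st1.1.getD r []).length - 2)).foldl (fun st2 c => pvPassCell st2 r c) st1) (bst, fst)).2
        = f0 + L'.length ∧
      L.length ≤ L'.length ∧
      ((rs.foldl (fun st1 r =>
          (List.range' 1 ((st1.1.getD r []).length - 2)).foldl (fun st2 c => pvPassCell st2 r c) st1) (bst, fst)).2 = fst →
        (rs.foldl (fun st1 r =>
          (List.range' 1 ((st1.1.getD r []).length - 2)).foldl (fun st2 c => pvPassCell st2 r c) st1) (bst, fst)) = (bst, fst) ∧
        ∀ r ∈ rs, ∀ c, 1 ≤ c → c + 1 < (b0.getD r []).length → pvBget bst r c ≠ 10) := by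
  intro rs
  induction rs with
  | nil =>
    intro bst fst L hch hf _
    exact ⟨L, hch, hf, le_refl _, fun _ => ⟨rfl, by simp⟩⟩
  | cons r rs' ih =>
    intro bst fst L hch hf hrs
    rw [List.foldl_cons]
    set st1 := (List.range' 1 ((bst.getD r []).length - 2)).foldl (fun st2 c => pvPassCell st2 r c) (bst, fst) with hst1
    have hshape := pv_chain_shape hch
    have hrowlen : ((bst.getD r []).length) = (b0.getD r []).length := hshape.2 r
    have hr := hrs r (by simp)
    have hcsb : ∀ c ∈ List.range' 1 ((bst.getD r []).length - 2), 1 ≤ c ∧ c + 1 < (b0.getD r []).length := by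
      intro c hc
      rw [List.mem_range'_1] at hc
      rw [hrowlen] at hc
      omega
    obtain ⟨L1, h1, h2, h3, h4⟩ := pv_cols_fold b0 f0 r hr.1 hr.2 _ bst fst L hch hf hcsb
    rw [← hst1] at h1 h2 h4
    have hrs' : ∀ r' ∈ rs', 1 ≤ r' ∧ r' + 1 < b0.length := fun r' hr' => hrs r' (by simp [hr'])
    obtain ⟨L', g1, g2, g3, g4⟩ := ih st1.1 st1.2 L1 h1 h2 hrs'
    refine ⟨L', g1, g2, by omega, ?_⟩
    intro hcount
    have hmid : st1.2 = fst := by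
      rw [g2] at hcount
      rw [hf] at hcount
      rw [h2, hf]
      omega
    obtain ⟨he1, hall1⟩ := h4 hmid
    obtain ⟨he2, hall2⟩ := g4 (by rw [hcount, ← hmid])
    have hb1 : st1.1 = bst := by rw [he1]
    refine ⟨?_, ?_⟩
    · rw [he2, hb1, ← hmid]
    · intro r' hr' c hc1 hc2
      rcases List.mem_cons.mp hr' with rfl | hr'
      · apply hall1
        rw [List.mem_range'_1, hrowlen]
        omega
      · have := hall2 r' hr' c hc1 hc2
        rw [hb1] at this
        exact this

theorem pv_pass_chain (b : List (List Int)) (f : Int) :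
    ∃ L, pvChain b L (pvPass (b, f)).1 ∧ (pvPass (b, f)).2 = f + L.length ∧
      ((pvPass (b, f)).2 = f → pvNF b) := by
  obtain ⟨L', h1, h2, -, h4⟩ := pv_rows_fold b f (List.range' 1 (b.length - 2)) b f []
    (.nil b) (by simp) (by intro r hr; rw [List.mem_range'_1] at hr; omega)
  refine ⟨L', h1, h2, ?_⟩
  intro hcount
  obtain ⟨-, hall⟩ := h4 hcount
  intro x hx
  obtain ⟨⟨i1, i2, i3, i4⟩, hv⟩ := hx
  exact hall x.1 (by rw [List.mem_range'_1]; omega) x.2 i3 i4 hv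

theorem pv_go_chain : ∀ (fuel : Nat) (b : List (List Int)) (f : Int), pvInv b → pvMu b < fuel →
    ∃ L b', find_tens_go fuel b f = (b', f + L.length) ∧ pvChain b L b' ∧ pvNF b' := by
  intro fuel
  induction fuel with
  | zero => intro b f _ h; omega
  | succ fuel ih =>
    intro b f hI hmu
    by_cases h : pvHasTen b = true
    · obtain ⟨L1, hc1, hf1, hnfif⟩ := pv_pass_chain b f
      have hL1len : 1 ≤ L1.length := by
        by_contra hlen
        obtain ⟨x, hx⟩ := pv_inv_hasTen hI h
        have : L1 = [] := by
          cases L1 with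
          | nil => rfl
          | cons _ _ => simp at hlen
        subst this
        exact (hnfif (by rw [hf1]; simp)) x hx
      have hmu1 := pv_chain_mu hc1
      have hI1 := pv_chain_inv hc1 hI
      obtain ⟨L2, b', he, hc2, hnf⟩ := ih (pvPass (b, f)).1 (pvPass (b, f)).2 hI1 (by omega)
      refine ⟨L1 ++ L2, b', ?_, pv_chain_append hc1 hc2, hnf⟩
      show find_tens_go (fuel + 1) b f = _
      simp only [find_tens_go, h, if_pos]
      rw [he, hf1]
      simp only [List.length_append]
      push_cast
      ring_nf
    · refine ⟨[], b, ?_, .nil b, pv_nf_of_not_hasTen (by simpa using h)⟩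
      show find_tens_go (fuel + 1) b f = _
      simp only [find_tens_go, h, Bool.false_eq_true, if_false]
      simp

-- ---- port B produces a chain to a normal form ----

theorem pv_nbrs_lit (a e : Nat) :
    pvNbrs (a + 1, e + 1) =
      [(a + 2, e + 1), (a, e + 1), (a + 1, e + 2), (a + 1, e),
       (a + 2, e), (a + 2, e + 2), (a, e + 2), (a, e)] := by
  simp only [pvNbrs, pvDirs, pvNbr, List.map_cons, List.map_nil]
  simp only [List.cons.injEq, and_true, Prod.mk.injEq]
  omega

theorem pv_nbrs_nodup (a e : Nat) : (pvNbrs (a + 1, e + 1)).Nodup := by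
  rw [pv_nbrs_lit]
  simp [Prod.ext_iff]

theorem pv_center_not_mem (a e : Nat) : (a + 1, e + 1) ∉ pvNbrs (a + 1, e + 1) := by
  rw [pv_nbrs_lit]
  simp [Prod.ext_iff]

-- the loop body of B's neighbour fold, named for the proofs
def pvStepB (n : Nat) (r c : Nat) (acc : List (List Int) × List (Nat × Nat)) (d : Int × Int) :
    List (List Int) × List (Nat × Nat) :=
  if pvBget acc.1 (pvNbr (r, c) d).1 (pvNbr (r, c) d).2 ≠ 10 ∧
     pvBget acc.1 (pvNbr (r, c) d).1 (pvNbr (r, c) d).2 ≠ 0 then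
    (pvBset acc.1 (pvNbr (r, c) d).1 (pvNbr (r, c) d).2
       (pvBget acc.1 (pvNbr (r, c) d).1 (pvNbr (r, c) d).2 + 1),
     if pvBget acc.1 (pvNbr (r, c) d).1 (pvNbr (r, c) d).2 + 1 = 10 ∧
        1 ≤ (pvNbr (r, c) d).1 ∧ (pvNbr (r, c) d).1 + 1 < n ∧
        1 ≤ (pvNbr (r, c) d).2 ∧ (pvNbr (r, c) d).2 + 1 < (acc.1.getD (pvNbr (r, c) d).1 []).length
     then (pvNbr (r, c) d) :: acc.2 else acc.2)
  else acc

theorem pv_alt_go_step (n fuel : Nat) (b : List (List Int)) (f : Int) (r c : Nat)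
    (rest : List (Nat × Nat)) :
    find_tens_alt_go n (fuel + 1) b f ((r, c) :: rest) =
      find_tens_alt_go n fuel
        (pvDirs.foldl (pvStepB n r c) (pvBset b r c 0, rest)).1 (f + 1)
        (pvDirs.foldl (pvStepB n r c) (pvBset b r c 0, rest)).2 := rfl

def pvPushP (b0 : List (List Int)) (n : Nat) (y : Nat × Nat) : Bool :=
  decide (pvBget b0 y.1 y.2 = 9 ∧ 1 ≤ y.1 ∧ y.1 + 1 < n ∧ 1 ≤ y.2 ∧
    y.2 + 1 < (b0.getD y.1 []).length)

set_option maxHeartbeats 1000000 in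
theorem pv_foldB (b0 : List (List Int)) (n : Nat) (r c : Nat) :
    ∀ (ds : List (Int × Int)) (b' : List (List Int)) (st : List (Nat × Nat)),
    (∀ d ∈ ds, pvBget b' (pvNbr (r, c) d).1 (pvNbr (r, c) d).2
      = pvBget b0 (pvNbr (r, c) d).1 (pvNbr (r, c) d).2) →
    (∀ rr, (b'.getD rr []).length = (b0.getD rr []).length) →
    (ds.map (pvNbr (r, c))).Nodup →
    (ds.foldl (pvStepB n r c) (b', st)).1 = ds.foldl (fun bb d => pvIncAt bb (pvNbr (r, c) d)) b' ∧
    (ds.foldl (pvStepB n r c) (b', st)).2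
      = ((ds.map (pvNbr (r, c))).filter (pvPushP b0 n)).reverse ++ st := by
  intro ds
  induction ds with
  | nil => intro b' st _ _ _; exact ⟨rfl, by simp⟩
  | cons d ds' ih =>
    intro b' st hagree hrow hnodup
    rw [List.foldl_cons, List.foldl_cons]
    have hyagree := hagree d (by simp)
    have hynotin : pvNbr (r, c) d ∉ ds'.map (pvNbr (r, c)) := by
      simp only [List.map_cons, List.nodup_cons] at hnodup
      exact hnodup.1
    have hnodup' : (ds'.map (pvNbr (r, c))).Nodup := by
      simp only [List.map_cons, List.nodup_cons] at hnodup
      exact hnodup.2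
    have hagree' : ∀ b'' : List (List Int),
        (∀ rr cc, pvBget b'' rr cc = pvBget b' rr cc ∨
          ((pvNbr (r, c) d).1 = rr ∧ (pvNbr (r, c) d).2 = cc)) →
        ∀ d' ∈ ds', pvBget b'' (pvNbr (r, c) d').1 (pvNbr (r, c) d').2
          = pvBget b0 (pvNbr (r, c) d').1 (pvNbr (r, c) d').2 := by
      intro b'' hb d' hd'
      rcases hb (pvNbr (r, c) d').1 (pvNbr (r, c) d').2 with h | h
      · rw [h]; exact hagree d' (by simp [hd'])
      · exfalso
        apply hynotin
        have : pvNbr (r, c) d = pvNbr (r, c) d' := Prod.ext h.1 h.2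
        rw [this]
        exact List.mem_map_of_mem hd'
    set y := pvNbr (r, c) d with hy
    have hstep : pvStepB n r c (b', st) d =
        (pvIncAt b' y,
         if pvBget b' y.1 y.2 + 1 = 10 ∧ 1 ≤ y.1 ∧ y.1 + 1 < n ∧ 1 ≤ y.2 ∧
            y.2 + 1 < (b'.getD y.1 []).length
         then y :: st else st) := by
      unfold pvStepB pvIncAt
      dsimp only
      rw [← hy]
      by_cases hv : pvBget b' y.1 y.2 ≠ 10 ∧ pvBget b' y.1 y.2 ≠ 0
      · rw [if_pos hv, if_pos hv]
      · rw [if_neg hv, if_neg hv]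
        have : ¬(pvBget b' y.1 y.2 + 1 = 10 ∧ 1 ≤ y.1 ∧ y.1 + 1 < n ∧ 1 ≤ y.2 ∧
            y.2 + 1 < (b'.getD y.1 []).length) := by
          rintro ⟨h9, -⟩
          apply hv
          constructor <;> omega
        rw [if_neg this]
    rw [hstep]
    have hpush_iff : (pvBget b' y.1 y.2 + 1 = 10 ∧ 1 ≤ y.1 ∧ y.1 + 1 < n ∧ 1 ≤ y.2 ∧
        y.2 + 1 < (b'.getD y.1 []).length) ↔ pvPushP b0 n y = true := by
      unfold pvPushP
      rw [hyagree, hrow]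
      simp only [decide_eq_true_eq]
      omega
    have hbagree : ∀ rr cc, pvBget (pvIncAt b' y) rr cc = pvBget b' rr cc ∨ (y.1 = rr ∧ y.2 = cc) := by
      intro rr cc
      rw [pv_bget_incAt]
      by_cases hz : y = (rr, cc)
      · right; exact ⟨by rw [hz], by rw [hz]⟩
      · left; rw [if_neg hz]
    have hrow' : ∀ rr, ((pvIncAt b' y).getD rr []).length = (b0.getD rr []).length := by
      intro rr; rw [pv_rowlen_incAt]; exact hrow rr
    by_cases hpush : pvBget b' y.1 y.2 + 1 = 10 ∧ 1 ≤ y.1 ∧ y.1 + 1 < n ∧ 1 ≤ y.2 ∧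
        y.2 + 1 < (b'.getD y.1 []).length
    · rw [if_pos hpush]
      obtain ⟨g1, g2⟩ := ih (pvIncAt b' y) (y :: st) (hagree' _ hbagree) hrow' hnodup'
      refine ⟨g1, ?_⟩
      rw [g2]
      simp only [List.map_cons, List.filter_cons]
      rw [← hy]
      simp only [hpush_iff.mp hpush, if_true]
      rw [List.reverse_cons, List.append_assoc]
      rfl
    · rw [if_neg hpush]
      obtain ⟨g1, g2⟩ := ih (pvIncAt b' y) st (hagree' _ hbagree) hrow' hnodup'
      refine ⟨g1, ?_⟩
      rw [g2]
      simp only [List.map_cons, List.filter_cons]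
      rw [← hy]
      have hfalse : pvPushP b0 n y = false := by
        rw [← Bool.not_eq_true]
        intro hc
        exact hpush (hpush_iff.mpr hc)
      simp only [hfalse, Bool.false_eq_true, if_false]

set_option maxHeartbeats 1000000 in
theorem pv_alt_go_chain (n : Nat) : ∀ (fuel : Nat) (b : List (List Int)) (f : Int)
    (stack : List (Nat × Nat)),
    b.length = n →
    (∀ z ∈ stack, pvAppl b z) → (∀ z, pvAppl b z → z ∈ stack) → stack.Nodup →
    pvMu b < fuel →
    ∃ L b', find_tens_alt_go n fuel b f stack = (b', f + L.length) ∧ pvChain b L b' ∧ pvNF b' := by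
  intro fuel
  induction fuel with
  | zero => intro b f stack _ _ _ _ h; omega
  | succ fuel ih =>
    intro b f stack hn hs1 hs2 hs3 hmu
    rcases stack with _ | ⟨⟨r, c⟩, rest⟩
    · refine ⟨[], b, by simp [find_tens_alt_go], .nil b, ?_⟩
      intro z hz
      have := hs2 z hz
      simp at this
    · have hx : pvAppl b (r, c) := hs1 _ (by simp)
      have hint := hx.1
      obtain ⟨a, rfl⟩ : ∃ a, r = a + 1 := ⟨r - 1, by have := hint.1; omega⟩
      obtain ⟨e, rfl⟩ : ∃ e, c = e + 1 := ⟨c - 1, by have := hint.2.2.1; omega⟩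
      have hv10 : pvBget b (a + 1) (e + 1) = 10 := hx.2
      have hcenter := pv_center_not_mem a e
      have hnodupN := pv_nbrs_nodup a e
      have hagree : ∀ d ∈ pvDirs,
          pvBget (pvBset b (a + 1) (e + 1) 0) (pvNbr (a + 1, e + 1) d).1 (pvNbr (a + 1, e + 1) d).2
            = pvBget b (pvNbr (a + 1, e + 1) d).1 (pvNbr (a + 1, e + 1) d).2 := by
        intro d hd
        rw [pv_bget_bset0]
        rw [if_neg ?_]
        rintro ⟨u1, u2⟩
        apply hcenter
        have heq : pvNbr (a + 1, e + 1) d = (a + 1, e + 1) := Prod.ext u1.symm u2.symm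
        have hmm : pvNbr (a + 1, e + 1) d ∈ pvDirs.map (pvNbr (a + 1, e + 1)) :=
          List.mem_map_of_mem hd
        rw [heq] at hmm
        exact hmm
      obtain ⟨P1, P2⟩ := pv_foldB b n (a + 1) (e + 1) pvDirs (pvBset b (a + 1) (e + 1) 0) rest
        hagree (fun rr => pv_rowlen_bset b (a + 1) (e + 1) 0 rr) hnodupN
      have hmapN : List.map (pvNbr (a + 1, e + 1)) pvDirs = pvNbrs (a + 1, e + 1) := rfl
      have hflash : pvDirs.foldl (fun bb d => pvIncAt bb (pvNbr (a + 1, e + 1) d))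
          (pvBset b (a + 1) (e + 1) 0) = pvFlash b (a + 1, e + 1) := rfl
      rw [hflash] at P1
      rw [hmapN] at P2
      have hshape1 : (pvFlash b (a + 1, e + 1)).length = b.length := pv_length_flash b _
      have hshape2 : ∀ rr, ((pvFlash b (a + 1, e + 1)).getD rr []).length = (b.getD rr []).length :=
        pv_rowlen_flash b _
      have hcount1 : ∀ z ∈ pvNbrs (a + 1, e + 1), (pvNbrs (a + 1, e + 1)).count z = 1 := by
        intro z hz
        have hle := List.nodup_iff_count_le_one.mp hnodupN z
        have hpos : 0 < (pvNbrs (a + 1, e + 1)).count z := List.count_pos_iff.mpr hz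
        omega
      have hbget2 : ∀ z : Nat × Nat, pvBget (pvFlash b (a + 1, e + 1)) z.1 z.2 =
          if (a + 1, e + 1) = z then 0
          else if z ∈ pvNbrs (a + 1, e + 1) then pvIncIf (pvBget b z.1 z.2)
          else pvBget b z.1 z.2 := by
        intro z
        rw [pv_bget_flash]
        by_cases hc : (a + 1, e + 1) = z
        · rw [if_pos (by rw [← hc]), if_pos hc, pv_iter_incIf_zero]
        · rw [if_neg (by rw [show ((z.1, z.2) : Nat × Nat) = z from rfl]; exact hc),
            if_neg hc]
          by_cases hm : z ∈ pvNbrs (a + 1, e + 1)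
          · rw [if_pos hm, show ((z.1, z.2) : Nat × Nat) = z from rfl, hcount1 z hm]
            rfl
          · rw [if_neg hm, show ((z.1, z.2) : Nat × Nat) = z from rfl,
              List.count_eq_zero.mpr hm]
            rfl
      have hpush_mem : ∀ z ∈ (pvNbrs (a + 1, e + 1)).filter (pvPushP b n),
          pvBget b z.1 z.2 = 9 ∧ pvInterior b z := by
        intro z hz
        have := List.of_mem_filter hz
        unfold pvPushP at this
        rw [decide_eq_true_eq] at this
        exact ⟨this.1, ⟨this.2.1, by rw [hn]; exact this.2.2.1, this.2.2.2.1, this.2.2.2.2⟩⟩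
      have hi1 : ∀ z ∈ ((pvNbrs (a + 1, e + 1)).filter (pvPushP b n)).reverse ++ rest,
          pvAppl (pvFlash b (a + 1, e + 1)) z := by
        intro z hz
        rcases List.mem_append.mp hz with hz | hz
        · rw [List.mem_reverse] at hz
          obtain ⟨h9, hI⟩ := hpush_mem z hz
          refine ⟨pv_interior_shape b _ z hshape1 hshape2 hI, ?_⟩
          rw [hbget2 z]
          rw [if_neg (by rintro rfl; rw [hv10] at h9; omega)]
          rw [if_pos (List.mem_of_mem_filter hz)]
          rw [h9]
          norm_num [pvIncIf]
        · have hzr : pvAppl b z := hs1 z (List.mem_cons_of_mem _ hz)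
          have hzne : z ≠ (a + 1, e + 1) := by
            rintro rfl
            exact (List.nodup_cons.mp hs3).1 hz
          exact pv_appl_flash hzr hzne
      have hi2 : ∀ z, pvAppl (pvFlash b (a + 1, e + 1)) z →
          z ∈ ((pvNbrs (a + 1, e + 1)).filter (pvPushP b n)).reverse ++ rest := by
        intro z hz
        have hzv := hz.2
        rw [hbget2 z] at hzv
        by_cases hzc : (a + 1, e + 1) = z
        · rw [if_pos hzc] at hzv; omega
        · rw [if_neg hzc] at hzv
          have hIb : pvInterior b z :=
            pv_interior_shape _ b z hshape1.symm (fun rr => (hshape2 rr).symm) hz.1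
          by_cases hz10 : pvBget b z.1 z.2 = 10
          · have : z ∈ (a + 1, e + 1) :: rest := hs2 z ⟨hIb, hz10⟩
            rcases List.mem_cons.mp this with rfl | hmem
            · exact absurd rfl hzc
            · exact List.mem_append_right _ hmem
          · by_cases hm : z ∈ pvNbrs (a + 1, e + 1)
            · rw [if_pos hm] at hzv
              have h9 : pvBget b z.1 z.2 = 9 := by
                unfold pvIncIf at hzv
                split at hzv <;> omega
              apply List.mem_append_left
              rw [List.mem_reverse]
              apply List.mem_filter.mpr
              refine ⟨hm, ?_⟩
              unfold pvPushP
              rw [decide_eq_true_eq]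
              exact ⟨h9, hIb.1, by rw [← hn]; exact hIb.2.1, hIb.2.2.1, hIb.2.2.2⟩
            · rw [if_neg hm] at hzv
              exact absurd hzv hz10
      have hdisj : ∀ z, z ∈ ((pvNbrs (a + 1, e + 1)).filter (pvPushP b n)).reverse →
          z ∈ rest → False := by
        intro z hz1 hz2
        rw [List.mem_reverse] at hz1
        have h9 := (hpush_mem z hz1).1
        have h10 := (hs1 z (List.mem_cons_of_mem _ hz2)).2
        omega
      have hnodup2 : (((pvNbrs (a + 1, e + 1)).filter (pvPushP b n)).reverse ++ rest).Nodup := by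
        rw [List.nodup_append]
        refine ⟨by rw [List.nodup_reverse]; exact hnodupN.filter _,
          (List.nodup_cons.mp hs3).2, ?_⟩
        intro z hz1 w hz2 heq
        exact hdisj z hz1 (by rw [heq]; exact hz2)
      have hmu2 := pv_mu_flash_lt hx
      obtain ⟨L, b', he, hc, hnf⟩ := ih (pvFlash b (a + 1, e + 1)) (f + 1)
        (((pvNbrs (a + 1, e + 1)).filter (pvPushP b n)).reverse ++ rest)
        (by rw [hshape1, hn]) hi1 hi2 hnodup2 (by omega)
      refine ⟨(a + 1, e + 1) :: L, b', ?_, .cons hx hc, hnf⟩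
      rw [pv_alt_go_step, P1, P2, he]
      have : (f + 1) + (L.length : Int) = f + (((a + 1, e + 1) :: L : List (Nat × Nat)).length : Int) := by
        simp only [List.length_cons]
        push_cast
        ring
      rw [this]

-- ---- the initial stack of port B, and the main theorem ----

def pvStack0 (board : List (List Int)) : List (Nat × Nat) :=
  (List.range' 1 (board.length - 2)).flatMap (fun r =>
    (List.range' 1 ((board.getD r []).length - 2)).filterMap (fun c =>
      if pvBget board r c = 10 then some (r, c) else none))

theorem pv_alt_eq (board : List (List Int)) (flashes : Int) :
    find_tens_alt board flashes =
      find_tens_alt_go board.length ((board.map List.length).sum + 1) board flashes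
        (pvStack0 board).reverse := rfl

theorem pv_go_eq (board : List (List Int)) (flashes : Int) :
    find_tens board flashes =
      find_tens_go ((board.map List.length).sum + 1) board flashes := rfl

theorem pv_mem_stack0 (board : List (List Int)) (z : Nat × Nat) :
    z ∈ pvStack0 board ↔ pvAppl board z := by
  unfold pvStack0
  rw [List.mem_flatMap]
  constructor
  · rintro ⟨r, hr, hz⟩
    rw [List.mem_range'_1] at hr
    rw [List.mem_filterMap] at hz
    obtain ⟨c, hc, hsome⟩ := hz
    rw [List.mem_range'_1] at hc
    by_cases h10 : pvBget board r c = 10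
    · rw [if_pos h10] at hsome
      have hzrc : z = (r, c) := (Option.some_inj.mp hsome).symm
      subst hzrc
      refine ⟨⟨?_, ?_, ?_, ?_⟩, h10⟩
      · show 1 ≤ r; omega
      · show r + 1 < board.length; omega
      · show 1 ≤ c; omega
      · show c + 1 < (board.getD r []).length; omega
    · rw [if_neg h10] at hsome
      exact absurd hsome (by simp)
  · rintro ⟨⟨h1, h2, h3, h4⟩, hv⟩
    refine ⟨z.1, ?_, ?_⟩
    · rw [List.mem_range'_1]; omega
    · rw [List.mem_filterMap]
      refine ⟨z.2, ?_, ?_⟩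
      · rw [List.mem_range'_1]; omega
      · rw [if_pos hv]

theorem pv_stack0_nodup (board : List (List Int)) : (pvStack0 board).Nodup := by
  unfold pvStack0
  rw [List.nodup_flatMap]
  constructor
  · intro r _
    apply List.Nodup.filterMap
    · intro c c' z hz hz'
      have hc : z = (r, c) := by
        by_cases h : pvBget board r c = 10
        · rw [if_pos h] at hz; exact (Option.mem_some_iff.mp hz).symm
        · rw [if_neg h] at hz; exact absurd hz (by simp)
      have hc' : z = (r, c') := by
        by_cases h : pvBget board r c' = 10
        · rw [if_pos h] at hz'; exact (Option.mem_some_iff.mp hz').symm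
        · rw [if_neg h] at hz'; exact absurd hz' (by simp)
      rw [hc] at hc'
      exact (Prod.ext_iff.mp hc').2
    · exact List.nodup_range'
  · refine List.Pairwise.imp ?_ (List.pairwise_lt_range' 1)
    intro r1 r2 hlt
    show List.Disjoint _ _
    intro z hz1 hz2
    rw [List.mem_filterMap] at hz1 hz2
    obtain ⟨c1, -, hs1⟩ := hz1
    obtain ⟨c2, -, hs2⟩ := hz2
    have h1 : z = (r1, c1) := by
      by_cases h : pvBget board r1 c1 = 10
      · rw [if_pos h] at hs1; exact (Option.some_inj.mp hs1).symm
      · rw [if_neg h] at hs1; exact absurd hs1 (by simp)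
    have h2 : z = (r2, c2) := by
      by_cases h : pvBget board r2 c2 = 10
      · rw [if_pos h] at hs2; exact (Option.some_inj.mp hs2).symm
      · rw [if_neg h] at hs2; exact absurd hs2 (by simp)
    rw [h1] at h2
    have := (Prod.ext_iff.mp h2).1
    omega

theorem pv_inv_of_pre (board : List (List Int))
    (hsent : ∀ row ∈ PySem.List.slice board (some 1) (some (-1)),
      (∀ v ∈ row.head?, pvSent v) ∧ (∀ v ∈ row.getLast?, pvSent v)) :
    pvInv board := by
  intro r h1 h2
  have hm : board.getD r [] ∈ PySem.List.slice board (some 1) (some (-1)) := by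
    rw [pv_mem_mid]
    exact ⟨r, h1, h2, rfl⟩
  obtain ⟨hh, hl⟩ := hsent _ hm
  rcases hrow : board.getD r [] with _ | ⟨v0, t⟩
  · have hb : ∀ c, pvBget board r c = 0 := by
      intro c
      unfold pvBget
      rw [hrow]
      simp
    exact ⟨Or.inl (hb 0), Or.inl (hb _)⟩
  · rw [hrow] at hh hl
    constructor
    · have : pvBget board r 0 = v0 := by
        unfold pvBget
        rw [hrow]
        rfl
      rw [this]
      exact hh v0 rfl
    · have : pvBget board r ((v0 :: t).length - 1)
          = (v0 :: t).getD ((v0 :: t).length - 1) 0 := by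
        unfold pvBget
        rw [hrow]
      rw [this, pv_getD_eq _ _ _ (by simp)]
      apply hl
      rw [List.getLast?_eq_getElem?, List.getElem?_eq_getElem (by simp)]
      rfl

-- ===== VERDICT (by name: the statement is the Claim_ definition above) =====
theorem find_tens_spec : Claim_equal_find_tens := by
  intro board flashes _hdom hpre
  unfold Spec_find_tens
  by_cases h1 : ∀ row ∈ PySem.List.slice board (some 1) (some (-1)), (10 : Int) ∉ row
  · -- no 10 anywhere in the middle rows: both sides return immediately
    have hfalse : pvHasTen board = false := by
      rw [← Bool.not_eq_true, pv_hasTen_iff]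
      rintro ⟨row, hm, h10⟩
      exact h1 row hm h10
    have hS : pvStack0 board = [] := by
      rw [List.eq_nil_iff_forall_not_mem]
      intro z hz
      obtain ⟨⟨i1, i2, i3, i4⟩, hv⟩ := (pv_mem_stack0 board z).mp hz
      apply h1 (board.getD z.1 [])
      · rw [pv_mem_mid]; exact ⟨z.1, i1, i2, rfl⟩
      · rw [← hv]; exact pv_getD_mem_row _ _ (by omega)
    rw [pv_go_eq, pv_alt_eq, hS]
    simp only [find_tens_go, hfalse, Bool.false_eq_true, if_false, List.reverse_nil]
    rfl
  · have hpre2 := hpre.resolve_left h1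
    have hInv : pvInv board := pv_inv_of_pre board (fun row hm => hpre2.2 row hm)
    have hmu : pvMu board < (board.map List.length).sum + 1 := by
      have := pv_mu_le_sum board
      omega
    obtain ⟨LA, bA, heA, hcA, hnfA⟩ :=
      pv_go_chain ((board.map List.length).sum + 1) board flashes hInv hmu
    obtain ⟨LB, bB, heB, hcB, hnfB⟩ :=
      pv_alt_go_chain board.length ((board.map List.length).sum + 1) board flashes
        (pvStack0 board).reverse rfl
        (fun z hz => (pv_mem_stack0 board z).mp (List.mem_reverse.mp hz))
        (fun z hz => List.mem_reverse.mpr ((pv_mem_stack0 board z).mpr hz))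
        (by rw [List.nodup_reverse]; exact pv_stack0_nodup board)
        hmu
    obtain ⟨hbeq, hleq⟩ := pv_det hcA hnfA hcB hnfB
    rw [pv_go_eq, pv_alt_eq, heA, heB, hbeq, hleq]
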